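-- pv_equiv track=rewrite | github.com/hoo00nn/Algorithm | Programmers_KAKAO/2020카카오 블라인드 채용-괄호 변환.py | getBracket
-- ===== SOURCE A (Python) =====
-- def checkBracket(n):
--     stack = []
--
--     for i in n:
--         if i == '(':
--             stack.append(i)
--         elif i == ')' and len(stack) == 0:
--             return False
--         else:
--             stack.pop()
--
--     return len(stack) == 0
--
-- def getBracket(k):
--     openBracket = 0
--     closeBracket = 0
--     u = ''
--     v = ''
--
--     if len(k) == 0:
--         return ''
--     else:
--         for i in k:
--             if i == '(':
--                 openBracket += 1
--             else:
--                 closeBracket += 1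
--
--             if openBracket == closeBracket:
--                 u = k[0:openBracket + closeBracket]
--                 v = k[openBracket + closeBracket:]
--                 break
--
--         if checkBracket(u):
--             u += getBracket(v)
--             return u
--         else:
--             s = ''
--             s += '('
--             s += getBracket(v)
--             s += ')'
--             u = list(u[1:-1])
--             for i in range(0, len(u)):
--                 if u[i] == '(':
--                     u[i] = ')'
--                 else:
--                     u[i] = '('
--             u = ''.join(u)
--             s += u
--             return s
-- ===== SOURCE B (Python) =====
-- def getBracket(k):
--     # One pass: cut k into minimal balanced chunks with a running balance,
--     # then assemble the result back-to-front over the chunk list.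
--     chunks = []
--     cur = []
--     bal = 0
--     for c in k:
--         cur.append(c)
--         bal += 1 if c == '(' else -1
--         if bal == 0:
--             chunks.append(''.join(cur))
--             cur = []
--     res = ''
--     for u in reversed(chunks):
--         if u[0] == '(':
--             res = u + res
--         else:
--             res = '(' + res + ')' + ''.join(')' if x == '(' else '(' for x in u[1:-1])
--     return res
-- ===== Notes on version B (the rewrite author's own statement) =====
-- stated objective: alternative
-- what changed: Replaces A's recursion that re-slices the suffix and re-scans each chunk with a stack-based checkBracket by a single pass that cuts the string into minimal balanced chunks with a running balance, decides each chunk's correctness by its first character, and assembles the result back-to-front over the chunk list.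
import Mathlib
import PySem

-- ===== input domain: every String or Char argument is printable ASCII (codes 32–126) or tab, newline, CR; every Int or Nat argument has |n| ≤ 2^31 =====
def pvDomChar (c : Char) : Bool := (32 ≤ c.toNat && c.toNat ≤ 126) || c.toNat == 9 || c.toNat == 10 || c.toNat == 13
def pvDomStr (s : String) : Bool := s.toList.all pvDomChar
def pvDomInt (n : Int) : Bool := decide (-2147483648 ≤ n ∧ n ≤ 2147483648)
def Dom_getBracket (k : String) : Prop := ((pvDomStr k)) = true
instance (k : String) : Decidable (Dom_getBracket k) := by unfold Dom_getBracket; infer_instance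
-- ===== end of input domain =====

-- B replaces A's recursion (re-slicing the suffix, re-scanning each chunk with checkBracket)
-- by one pass cutting the string into minimal balanced chunks, deciding each chunk by its
-- first character, and assembling the result back-to-front (objective: alternative).

-- ===== PORT A =====
-- checkBracket's loop; Python's stack.pop() raises IndexError on an empty stack (those
-- inputs are excluded by Pre_); the port drops from the empty list there.
def pvCheckLoop : List Char → List Char → Bool
  | stack, [] => stack.length == 0
  | stack, i :: rest =>
    if i == '(' then pvCheckLoop ('(' :: stack) rest
    else if i == ')' && stack.length == 0 then false
    else pvCheckLoop (stack.drop 1) rest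

def pvCheckBracket (n : List Char) : Bool := pvCheckLoop [] n

-- A's for-loop over k: counts openBracket/closeBracket and on the first tie returns
-- (u, v) = (k[0:open+close], k[open+close:]); if the loop ends without break, u = v = ''.
def pvSplitLoop (k : List Char) : List Char → Int → Int → (List Char × List Char)
  | [], _, _ => ([], [])
  | i :: rest, o, c =>
    let o' := if i == '(' then o + 1 else o
    let c' := if i == '(' then c else c + 1
    if o' == c' then
      (PySem.List.slice k (some 0) (some (o' + c')),
       PySem.List.slice k (some (o' + c')) none)
    else pvSplitLoop k rest o' c'

-- A's in-place flipping loop over list(u[1:-1])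
def pvFlipLoopA (u : List Char) : List Char := u.map (fun i => if i == '(' then ')' else '(')

-- termination helper for getBracketList: the suffix v handed to the recursive call is
-- shorter than k (cited by name in decreasing_by)
theorem pvSplitLoop_snd_small : ∀ (k' rest : List Char) (o c : Int), 0 ≤ o + c →
    (pvSplitLoop k' rest o c).2 = [] ∨ (pvSplitLoop k' rest o c).2.length < k'.length := by
  intro k' rest
  induction rest with
  | nil => intro o c _; left; simp [pvSplitLoop]
  | cons i rest ih =>
    intro o c hoc
    by_cases hi : i == '(' <;>
      simp only [pvSplitLoop, hi, if_pos, if_false, if_true, Bool.false_eq_true] <;>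
      split
    · rcases List.eq_nil_or_concat k' with hk | ⟨l, x, hk⟩
      · left; simp [hk, PySem.List.slice_from ([]:List Char) (by omega : (0:Int) ≤ o + 1 + c)]
      · right
        rw [PySem.List.slice_from k' (by omega : (0:Int) ≤ o + 1 + c)]
        have h1 : 1 ≤ (o + 1 + c).toNat := by omega
        subst hk; simp [List.length_drop]; omega
    · exact ih (o+1) c (by omega)
    · rcases List.eq_nil_or_concat k' with hk | ⟨l, x, hk⟩
      · left; simp [hk, PySem.List.slice_from ([]:List Char) (by omega : (0:Int) ≤ o + (c + 1))]
      · right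
        rw [PySem.List.slice_from k' (by omega : (0:Int) ≤ o + (c + 1))]
        have h1 : 1 ≤ (o + (c + 1)).toNat := by omega
        subst hk; simp [List.length_drop]; omega
    · exact ih o (c+1) (by omega)

def getBracketList (k : List Char) : List Char :=
  if h0 : k.length = 0 then []
  else if pvCheckBracket (pvSplitLoop k k 0 0).1 then
    (pvSplitLoop k k 0 0).1 ++ getBracketList (pvSplitLoop k k 0 0).2
  else
    '(' :: getBracketList (pvSplitLoop k k 0 0).2 ++
      ')' :: pvFlipLoopA (PySem.List.slice (pvSplitLoop k k 0 0).1 (some 1) (some (-1)))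
termination_by k.length
decreasing_by
  all_goals
    rcases pvSplitLoop_snd_small k k 0 0 (by omega) with h | h
    · rw [h]; simp only [List.length_nil]; omega
    · exact h
  
def getBracket (k : String) : String := String.mk (getBracketList k.toList)

-- ===== PORT B =====
-- one pass: running balance bal, current chunk cur, finished chunks
def pvChunksLoop : List Char → Int → List Char → List (List Char) → List (List Char)
  | [], _, _, chunks => chunks
  | c :: rest, bal, cur, chunks =>
    let cur' := cur ++ [c]
    let bal' := bal + (if c == '(' then 1 else -1)
    if bal' == 0 then pvChunksLoop rest bal' [] (chunks ++ [cur'])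
    else pvChunksLoop rest bal' cur' chunks

-- second loop of B: fold over reversed(chunks); u[0] (chunks are never empty) as head?
def pvBuildLoop : List (List Char) → List Char → List Char
  | [], res => res
  | u :: us, res =>
    if u.head? == some '(' then pvBuildLoop us (u ++ res)
    else
      pvBuildLoop us
        ('(' :: res ++ ')' ::
          (PySem.List.slice u (some 1) (some (-1))).map (fun x => if x == '(' then ')' else '('))

def pvAltList (l : List Char) : List Char :=
  pvBuildLoop (pvChunksLoop l 0 [] []).reverse []

def getBracket_alt (k : String) : String := String.mk (pvAltList k.toList)

-- ===== PRECONDITION & SPEC =====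
-- prefix balance used by Pre_: '(' counts +1, every other character −1 (as A counts)
def pvBalance (l : List Char) : Int := (l.map (fun c => if c = '(' then (1:Int) else -1)).sum

-- Pre_ excludes exactly the inputs on which A raises IndexError: those where some position
-- with prefix balance 0 that is later re-balanced holds a character other than '(' or ')'
-- (checkBracket then pops an empty stack).  A returns on every input Pre_ admits.
def Pre_getBracket (k : String) : Prop :=
  ∀ i < k.toList.length, pvBalance (k.toList.take i) = 0 →
    (∃ j < k.toList.length + 1, i < j ∧ pvBalance (k.toList.take j) = 0) →
    (k.toList[i]? = some '(' ∨ k.toList[i]? = some ')')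
instance (k : String) : Decidable (Pre_getBracket k) := by unfold Pre_getBracket; infer_instance

def pvWitness_getBracket : String := "(()())"

def Spec_getBracket (k : String) (out : String) : Prop := out = getBracket_alt k
instance (k : String) (out : String) : Decidable (Spec_getBracket k out) := by unfold Spec_getBracket; infer_instance

-- ===== CLAIM (what is proved, stated in full; the proofs are below) =====
def Claim_equal_getBracket : Prop := ∀ (k : String), Dom_getBracket k → Pre_getBracket k → Spec_getBracket k (getBracket k)

-- ===== LEMMAS AND PROOFS =====

-- reference scan: index of the first position (counting from the current one) at which the
-- running balance, started at bal, becomes 0; none if it never does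
def pvFZ : List Char → Int → Option Nat
  | [], _ => none
  | c :: rest, bal =>
    let b := bal + (if c == '(' then 1 else -1)
    if b = 0 then some 0 else (pvFZ rest b).map (· + 1)

theorem pvFZ_lt : ∀ (l : List Char) (b : Int) (j : Nat), pvFZ l b = some j → j < l.length := by
  intro l
  induction l with
  | nil => intro b j h; simp [pvFZ] at h
  | cons c rest ih =>
    intro b j h
    simp only [pvFZ] at h
    by_cases hb : (b + if c == '(' then (1:Int) else -1) = 0
    · rw [if_pos hb] at h
      simp only [Option.some.injEq] at h
      simp only [List.length_cons]
      omega
    · rw [if_neg hb] at h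
      simp only [Option.map_eq_some_iff] at h
      obtain ⟨j', hj', rfl⟩ := h
      have := ih _ _ hj'
      simp; omega

theorem pvFZ_take : ∀ (l : List Char) (b : Int) (j : Nat), pvFZ l b = some j →
    pvFZ (l.take (j + 1)) b = some j := by
  intro l
  induction l with
  | nil => intro b j h; simp [pvFZ] at h
  | cons c rest ih =>
    intro b j h
    simp only [pvFZ] at h
    by_cases hb : (b + if c == '(' then (1:Int) else -1) = 0
    · rw [if_pos hb] at h
      simp only [Option.some.injEq] at h
      subst h
      have ht : (c :: rest).take (0 + 1) = [c] := rfl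
      rw [ht]
      simp only [pvFZ]
      rw [if_pos hb]
    · rw [if_neg hb] at h
      simp only [Option.map_eq_some_iff] at h
      obtain ⟨j', hj', rfl⟩ := h
      simp only [List.take_succ_cons, pvFZ]
      rw [if_neg hb, ih _ _ hj']
      rfl

theorem pvSplitLoop_eq : ∀ (rest k' : List Char) (o c : Int),
    pvSplitLoop k' rest o c =
      match pvFZ rest (o - c) with
      | none => ([], [])
      | some j => (PySem.List.slice k' (some 0) (some (o + c + j + 1)),
                   PySem.List.slice k' (some (o + c + j + 1)) none) := by
  intro rest
  induction rest with
  | nil => intro k' o c; simp [pvSplitLoop, pvFZ]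
  | cons i rest ih =>
    intro k' o c
    by_cases hi : i == '('
    · simp only [pvSplitLoop, pvFZ, hi, if_true]
      by_cases hb : o + 1 = c
      · rw [if_pos (by simpa using hb), if_pos (by omega)]
        have : o + 1 + c = o + c + 1 := by ring
        simp [this]
      · rw [if_neg (by simpa using hb), if_neg (by omega), ih k' (o+1) c]
        have h1 : o + 1 - c = o - c + 1 := by ring
        rw [h1]
        cases hfz : pvFZ rest (o - c + 1) with
        | none => simp
        | some j =>
          simp only [Option.map_some]
          have : o + 1 + c + j + 1 = o + c + ((j + 1 : Nat) : Int) + 1 := by push_cast; ring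
          rw [this]
    · simp only [pvSplitLoop, pvFZ, hi, if_false, Bool.false_eq_true, if_neg]
      by_cases hb : o = c + 1
      · rw [if_pos (by simpa using hb), if_pos (by omega)]
        have : o + (c + 1) = o + c + 1 := by ring
        simp [this]
      · rw [if_neg (by simpa using hb), if_neg (by omega), ih k' o (c+1)]
        have h1 : o - (c + 1) = o - c + -1 := by ring
        rw [h1]
        cases hfz : pvFZ rest (o - c + -1) with
        | none => simp
        | some j =>
          simp only [Option.map_some]
          have : o + (c + 1) + j + 1 = o + c + ((j + 1 : Nat) : Int) + 1 := by push_cast; ring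
          rw [this]

-- accumulator lemma for B's chunk loop
theorem pvChunksLoop_acc : ∀ (rest : List Char) (bal : Int) (cur : List Char) (chs : List (List Char)),
    pvChunksLoop rest bal cur chs = chs ++ pvChunksLoop rest bal cur [] := by
  intro rest
  induction rest with
  | nil => intro bal cur chs; simp [pvChunksLoop]
  | cons c rest ih =>
    intro bal cur chs
    simp only [pvChunksLoop]
    by_cases hb : (bal + if c == '(' then (1:Int) else -1) = 0
    · rw [if_pos (show ((bal + if c == '(' then (1:Int) else -1) == 0) = true from beq_iff_eq.mpr hb),
          if_pos (show ((bal + if c == '(' then (1:Int) else -1) == 0) = true from beq_iff_eq.mpr hb)]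
      rw [ih _ _ (chs ++ [cur ++ [c]]), ih _ _ ([] ++ [cur ++ [c]])]
      simp
    · rw [if_neg (show ¬((bal + if c == '(' then (1:Int) else -1) == 0) = true from
            fun hh => hb (beq_iff_eq.mp hh)),
          if_neg (show ¬((bal + if c == '(' then (1:Int) else -1) == 0) = true from
            fun hh => hb (beq_iff_eq.mp hh))]
      exact ih _ _ chs

-- B's chunk loop produces the chunk ending at the first balance-zero point, then recurses
theorem pvChunksLoop_eq : ∀ (rest : List Char) (bal : Int) (cur : List Char),
    pvChunksLoop rest bal cur [] =
      match pvFZ rest bal with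
      | none => []
      | some j => (cur ++ rest.take (j + 1)) :: pvChunksLoop (rest.drop (j + 1)) 0 [] [] := by
  intro rest
  induction rest with
  | nil => intro bal cur; simp [pvChunksLoop, pvFZ]
  | cons c rest ih =>
    intro bal cur
    simp only [pvChunksLoop, pvFZ]
    by_cases hb : (bal + if c == '(' then (1:Int) else -1) = 0
    · rw [if_pos (show ((bal + if c == '(' then (1:Int) else -1) == 0) = true from beq_iff_eq.mpr hb),
          if_pos hb, pvChunksLoop_acc, hb]
      simp
    · rw [if_neg (show ¬((bal + if c == '(' then (1:Int) else -1) == 0) = true from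
            fun hh => hb (beq_iff_eq.mp hh)),
          if_neg hb, ih _ (cur ++ [c])]
      cases hfz : pvFZ rest (bal + if c == '(' then (1:Int) else -1) with
      | none => simp
      | some j => simp

-- B's build loop is a left fold
theorem pvBuildLoop_append : ∀ (l1 l2 : List (List Char)) (res : List Char),
    pvBuildLoop (l1 ++ l2) res = pvBuildLoop l2 (pvBuildLoop l1 res) := by
  intro l1
  induction l1 with
  | nil => intro l2 res; rfl
  | cons u us ih =>
    intro l2 res
    simp only [List.cons_append, pvBuildLoop]
    split <;> rw [ih]

-- checkBracket succeeds on a suffix whose balance, started at the positive stack height,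
-- first returns to 0 exactly at the end
theorem pvCheck_true : ∀ (u stack : List Char) (j : Nat), u.length = j + 1 →
    pvFZ u (stack.length : Int) = some j → 0 < stack.length →
    pvCheckLoop stack u = true := by
  intro u
  induction u with
  | nil => intro stack j h _ _; simp at h
  | cons c rest ih =>
    intro stack j hlen hfz hpos
    have hlen' : rest.length = j := by simpa using hlen
    simp only [pvFZ] at hfz
    by_cases hc : c == '('
    · simp only [hc, if_true] at hfz
      rw [if_neg (by omega : ¬((stack.length : Int) + 1 = 0))] at hfz
      simp only [Option.map_eq_some_iff] at hfz
      obtain ⟨j', hj', hj⟩ := hfz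
      simp only [pvCheckLoop, hc, if_true]
      have h2 : pvFZ rest ((('(' :: stack).length : Int)) = some j' := by
        have h3 : ((('(' :: stack).length : Int)) = (stack.length : Int) + 1 := by simp
        rw [h3]; exact hj'
      exact ih ('(' :: stack) j' (by omega) h2 (by simp)
    · simp only [hc, Bool.false_eq_true, if_false] at hfz
      simp only [pvCheckLoop, hc, Bool.false_eq_true, if_false]
      rw [if_neg (show ¬((c == ')' && stack.length == 0) = true) from fun hcontra => by
        rw [Bool.and_eq_true] at hcontra
        have h0 : stack.length = 0 := by simpa using hcontra.2
        omega)]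
      by_cases hb : (stack.length : Int) + -1 = 0
      · rw [if_pos hb] at hfz
        have hj0 : j = 0 := by simpa using hfz.symm
        have hrest : rest = [] := List.eq_nil_of_length_eq_zero (by omega)
        subst hrest
        simp only [pvCheckLoop, List.length_drop]
        simp
        omega
      · rw [if_neg hb] at hfz
        simp only [Option.map_eq_some_iff] at hfz
        obtain ⟨j', hj', hj⟩ := hfz
        have h2 : pvFZ rest (((stack.drop 1).length : Int)) = some j' := by
          have h3 : (((stack.drop 1).length : Int)) = (stack.length : Int) + -1 := by
            simp [List.length_drop]; omega
          rw [h3]; exact hj'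
        exact ih (stack.drop 1) j' (by omega) h2 (by simp [List.length_drop]; omega)

-- checkBracket fails when the balance starts strictly below the stack height (a deficit the
-- stack cannot see) and first returns to 0 exactly at the end
theorem pvCheck_false : ∀ (u stack : List Char) (b : Int) (j : Nat), u.length = j + 1 →
    pvFZ u b = some j → b < (stack.length : Int) →
    pvCheckLoop stack u = false := by
  intro u
  induction u with
  | nil => intro stack b j h _ _; simp at h
  | cons c rest ih =>
    intro stack b j hlen hfz hlt
    have hlen' : rest.length = j := by simpa using hlen
    simp only [pvFZ] at hfz
    by_cases hc : c == '('
    · simp only [hc, if_true] at hfz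
      simp only [pvCheckLoop, hc, if_true]
      by_cases hb : b + 1 = 0
      · rw [if_pos hb] at hfz
        have hj0 : j = 0 := by simpa using hfz.symm
        have hrest : rest = [] := List.eq_nil_of_length_eq_zero (by omega)
        subst hrest
        simp [pvCheckLoop]
      · rw [if_neg hb] at hfz
        simp only [Option.map_eq_some_iff] at hfz
        obtain ⟨j', hj', hj⟩ := hfz
        exact ih ('(' :: stack) (b + 1) j' (by omega) hj' (by simp; omega)
    · simp only [hc, Bool.false_eq_true, if_false] at hfz
      simp only [pvCheckLoop, hc, Bool.false_eq_true, if_false]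
      by_cases hst : c == ')' && stack.length == 0
      · rw [if_pos hst]
      · rw [if_neg hst]
        by_cases hb : b + -1 = 0
        · rw [if_pos hb] at hfz
          have hj0 : j = 0 := by simpa using hfz.symm
          have hrest : rest = [] := List.eq_nil_of_length_eq_zero (by omega)
          subst hrest
          -- here b = 1 and b < stack.length, so the stack keeps an element after the pop
          simp only [pvCheckLoop, List.length_drop]
          simp
          omega
        · rw [if_neg hb] at hfz
          simp only [Option.map_eq_some_iff] at hfz
          obtain ⟨j', hj', hj⟩ := hfz
          exact ih (stack.drop 1) (b + -1) j' (by omega) hj' (by simp [List.length_drop]; omega)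

-- on a minimal balanced chunk, checkBracket answers exactly "does it start with '('?"
theorem pvCheck_head : ∀ (u : List Char) (j : Nat), u.length = j + 1 →
    pvFZ u 0 = some j → pvCheckBracket u = (u.head? == some '(') := by
  intro u j hlen hfz
  cases u with
  | nil => simp at hlen
  | cons c rest =>
    have hlen' : rest.length = j := by simpa using hlen
    simp only [pvFZ] at hfz
    by_cases hc : c == '('
    · simp only [hc, if_true] at hfz
      rw [if_neg (by omega : ¬((0:Int) + 1 = 0))] at hfz
      simp only [Option.map_eq_some_iff] at hfz
      obtain ⟨j', hj', hj⟩ := hfz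
      simp only [pvCheckBracket, pvCheckLoop, hc, if_true]
      rw [pvCheck_true rest ['('] j' (by omega) (by simpa using hj') (by simp)]
      have : c = '(' := by simpa using hc
      subst this
      simp
    · simp only [hc, Bool.false_eq_true, if_false] at hfz
      rw [if_neg (by omega : ¬((0:Int) + -1 = 0))] at hfz
      simp only [Option.map_eq_some_iff] at hfz
      obtain ⟨j', hj', hj⟩ := hfz
      have hhead : ((c :: rest).head? == some '(') = false := by
        simp only [List.head?_cons, beq_eq_false_iff_ne, ne_eq, Option.some.injEq]
        simpa using hc
      rw [hhead]
      by_cases hp : c == ')'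
      · simp [pvCheckBracket, pvCheckLoop, hc, hp]
      · simp only [pvCheckBracket, pvCheckLoop, hc, Bool.false_eq_true, if_false]
        rw [if_neg (by simp [hp])]
        exact pvCheck_false rest (([] : List Char).drop 1) (0 + -1) j' (by omega) hj' (by simp)

-- the chunk decomposition of B, in recursive form
theorem pvChunks_rec (l : List Char) :
    pvChunksLoop l 0 [] [] =
      match pvFZ l 0 with
      | none => []
      | some j => l.take (j + 1) :: pvChunksLoop (l.drop (j + 1)) 0 [] [] := by
  rw [pvChunksLoop_eq l 0 []]
  cases pvFZ l 0
  · rfl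
  · simp

theorem pvAltList_none (l : List Char) (h : pvFZ l 0 = none) : pvAltList l = [] := by
  unfold pvAltList
  rw [pvChunks_rec, h]
  rfl

theorem pvAltList_some (l : List Char) (j : Nat) (h : pvFZ l 0 = some j) :
    pvAltList l =
      if (l.take (j + 1)).head? == some '(' then l.take (j + 1) ++ pvAltList (l.drop (j + 1))
      else
        '(' :: pvAltList (l.drop (j + 1)) ++ ')' ::
          (PySem.List.slice (l.take (j + 1)) (some 1) (some (-1))).map
            (fun i => if i == '(' then ')' else '(') := by
  unfold pvAltList
  rw [pvChunks_rec, h]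
  simp only [List.reverse_cons]
  rw [pvBuildLoop_append]
  simp only [pvBuildLoop]

-- the main equivalence, by strong induction on the length
theorem pvMain : ∀ (n : Nat) (l : List Char), l.length ≤ n → getBracketList l = pvAltList l := by
  intro n
  induction n with
  | zero =>
    intro l hl
    have : l = [] := List.eq_nil_of_length_eq_zero (by omega)
    subst this
    rw [getBracketList]
    simp [pvAltList, pvChunksLoop, pvBuildLoop]
  | succ n ih =>
    intro l hl
    by_cases hnil : l.length = 0
    · have : l = [] := List.eq_nil_of_length_eq_zero hnil
      subst this
      rw [getBracketList]
      simp [pvAltList, pvChunksLoop, pvBuildLoop]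
    · rw [getBracketList, dif_neg hnil]
      have hsplit := pvSplitLoop_eq l l 0 0
      simp only [show (0:Int) - 0 = 0 by ring] at hsplit
      cases hfz : pvFZ l 0 with
      | none =>
        simp only [hfz] at hsplit
        have h1 : (pvSplitLoop l l 0 0).1 = [] := by rw [hsplit]
        have h2 : (pvSplitLoop l l 0 0).2 = [] := by rw [hsplit]
        rw [h1, h2, pvAltList_none l hfz]
        rw [show pvCheckBracket ([] : List Char) = true from rfl, if_pos rfl]
        rw [getBracketList]
        simp
      | some j =>
        simp only [hfz] at hsplit
        have hjl : j < l.length := pvFZ_lt l 0 j hfz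
        have hcast : (0:Int) + 0 + (j:Int) + 1 = ((j + 1 : Nat) : Int) := by push_cast; ring
        rw [hcast] at hsplit
        have htake : PySem.List.slice l (some 0) (some ((j + 1 : Nat) : Int)) = l.take (j + 1) := by
          rw [PySem.List.slice_zero_start, PySem.List.slice_to_natCast l (j+1)]
        have hdrop : PySem.List.slice l (some ((j + 1 : Nat) : Int)) none = l.drop (j + 1) := by
          rw [PySem.List.slice_from_natCast l (j+1)]
        rw [htake, hdrop] at hsplit
        have h1 : (pvSplitLoop l l 0 0).1 = l.take (j + 1) := by rw [hsplit]
        have h2 : (pvSplitLoop l l 0 0).2 = l.drop (j + 1) := by rw [hsplit]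
        have hlen : (l.take (j + 1)).length = j + 1 := by simp; omega
        have hchk : pvCheckBracket (l.take (j + 1)) = ((l.take (j + 1)).head? == some '(') :=
          pvCheck_head (l.take (j + 1)) j hlen (pvFZ_take l 0 j hfz)
        have hrec : getBracketList (l.drop (j + 1)) = pvAltList (l.drop (j + 1)) := by
          apply ih
          simp [List.length_drop]
          omega
        rw [h1, h2, pvAltList_some l j hfz, hchk, hrec]
        unfold pvFlipLoopA
        rfl

-- ===== VERDICT (by name: the statement is the Claim_ definition above) =====
theorem getBracket_spec : Claim_equal_getBracket := by
  intro k _ _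
  unfold Spec_getBracket getBracket getBracket_alt
  exact congrArg String.mk (pvMain k.toList.length k.toList le_rfl)
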